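-- pv_equiv track=rewrite | github.com/bwanedead/Plattera | backend/alignment/section_normalizer.py | _create_fallback_mapping
-- ===== SOURCE A (Python) =====
-- from typing import List, Dict, Any, Tuple
--
-- def _create_fallback_mapping(current_count: int, target_count: int) -> List[Tuple[int, List[int]]]:
--     """Fallback even distribution mapping."""
--     if current_count == 0:
--         return []
--
--     targets_per = target_count // current_count
--     remainder = target_count % current_count
--
--     mapping = []
--     t_idx = 0
--     for c_idx in range(current_count):
--         num = targets_per + (1 if c_idx < remainder else 0)
--         t_list = list(range(t_idx, t_idx + num))
--         mapping.append((c_idx, t_list))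
--         t_idx += num
--     return mapping
-- ===== SOURCE B (Python) =====
-- def _create_fallback_mapping(current_count: int, target_count: int):
--     """Fallback even distribution mapping: each bucket computed directly from its index."""
--     if current_count == 0:
--         return []
--     q, r = divmod(target_count, current_count)
--     return [
--         (c, list(range(c * q + min(c, r), c * q + min(c, r) + q + (1 if c < r else 0))))
--         for c in range(current_count)
--     ]
-- ===== Notes on version B (the rewrite author's own statement) =====
-- stated objective: simpler
-- what changed: Replaces the stateful loop that threads a running t_idx accumulator and appends to a list with a single comprehension in which each bucket's target slice is computed in closed form from its index (start = c*q + min(c, r)).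
import Mathlib
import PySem

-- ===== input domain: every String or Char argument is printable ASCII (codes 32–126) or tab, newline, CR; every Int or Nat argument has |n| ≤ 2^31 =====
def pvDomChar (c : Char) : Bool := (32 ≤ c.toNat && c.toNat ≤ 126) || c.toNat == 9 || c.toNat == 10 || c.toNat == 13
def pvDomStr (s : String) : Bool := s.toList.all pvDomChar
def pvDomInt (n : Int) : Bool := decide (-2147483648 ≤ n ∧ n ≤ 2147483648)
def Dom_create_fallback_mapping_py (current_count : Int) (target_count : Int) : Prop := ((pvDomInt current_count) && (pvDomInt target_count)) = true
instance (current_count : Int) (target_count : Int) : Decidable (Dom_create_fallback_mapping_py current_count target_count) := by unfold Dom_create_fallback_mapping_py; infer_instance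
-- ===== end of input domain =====

-- B replaces A's stateful t_idx-accumulator loop with a comprehension computing each
-- bucket's target slice in closed form from its index (objective: simpler).


-- ===== PORT A =====
def create_fallback_mapping_py (current_count : Int) (target_count : Int) : List (Int × List Int) :=
  if current_count == 0 then []
  else
    let targets_per := PySem.Int.floordiv target_count current_count
    let remainder := PySem.Int.mod target_count current_count
    let st := (PySem.List.pyRange 0 current_count 1).foldl
      (fun (st : List (Int × List Int) × Int) c_idx =>
        let num := targets_per + (if c_idx < remainder then 1 else 0)
        let t_list := PySem.List.pyRange st.2 (st.2 + num) 1
        (st.1 ++ [(c_idx, t_list)], st.2 + num))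
      ([], 0)
    st.1

-- ===== PORT B =====
def create_fallback_mapping_py_alt (current_count : Int) (target_count : Int) : List (Int × List Int) :=
  if current_count == 0 then []
  else
    let q := PySem.Int.floordiv target_count current_count
    let r := PySem.Int.mod target_count current_count
    (PySem.List.pyRange 0 current_count 1).map
      (fun c =>
        (c, PySem.List.pyRange (c * q + min c r)
              (c * q + min c r + (q + (if c < r then 1 else 0))) 1))

-- ===== PRECONDITION & SPEC =====
def Spec_create_fallback_mapping_py (current_count : Int) (target_count : Int) (out : List (Int × List Int)) : Prop := out = create_fallback_mapping_py_alt current_count target_count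
instance (current_count : Int) (target_count : Int) (out : List (Int × List Int)) : Decidable (Spec_create_fallback_mapping_py current_count target_count out) := by unfold Spec_create_fallback_mapping_py; infer_instance

-- ===== CLAIM (what is proved, stated in full; the proofs are below) =====
def Claim_equal_create_fallback_mapping_py : Prop := ∀ (current_count : Int) (target_count : Int), Dom_create_fallback_mapping_py current_count target_count → Spec_create_fallback_mapping_py current_count target_count (create_fallback_mapping_py current_count target_count)

-- ===== LEMMAS AND PROOFS =====

-- Loop invariant: after the first n iterations, A's accumulator t_idx equals the closed
-- form n*q + min n r, and the mapping built so far is B's map over the same prefix.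
lemma cfm_fold_inv (q r : Int) (hr : 0 ≤ r) (n : Nat) :
    (PySem.List.pyRange 0 (n : Int) 1).foldl
      (fun (st : List (Int × List Int) × Int) c_idx =>
        (st.1 ++ [(c_idx, PySem.List.pyRange st.2
            (st.2 + (q + (if c_idx < r then 1 else 0))) 1)],
         st.2 + (q + (if c_idx < r then 1 else 0))))
      ([], 0)
    = ((PySem.List.pyRange 0 (n : Int) 1).map
        (fun c =>
          (c, PySem.List.pyRange (c * q + min c r)
                (c * q + min c r + (q + (if c < r then 1 else 0))) 1)),
       (n : Int) * q + min (n : Int) r) := by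
  induction n with
  | zero =>
    rw [show ((0:Nat):Int) = 0 from rfl, PySem.List.pyRange_one_eq_nil le_rfl]
    simp only [List.foldl_nil, List.map_nil]
    rw [Prod.mk.injEq]
    exact ⟨rfl, by omega⟩
  | succ n ih =>
    have h : PySem.List.pyRange 0 ((n : Int) + 1) 1
        = PySem.List.pyRange 0 (n : Int) 1 ++ [(n : Int)] := by
      exact PySem.List.pyRange_one_succ_right (by exact_mod_cast Nat.zero_le n)
    push_cast
    rw [h, List.foldl_append, List.map_append, ih]
    simp only [List.foldl_cons, List.foldl_nil, List.map_cons, List.map_nil]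
    rw [Prod.mk.injEq]
    refine ⟨rfl, ?_⟩
    have hmin : min ((n:Int)) r + (if ((n:Int)) < r then 1 else 0) = min ((n:Int)+1) r := by
      split_ifs with hc <;> omega
    rw [← hmin]; ring

theorem create_fallback_mapping_py_eq :
    ∀ (current_count target_count : Int),
      create_fallback_mapping_py current_count target_count
        = create_fallback_mapping_py_alt current_count target_count := by
  intro cc tc
  by_cases h0 : cc = 0
  · simp [create_fallback_mapping_py, create_fallback_mapping_py_alt, h0]
  · by_cases hneg : cc ≤ 0
    · have he : PySem.List.pyRange 0 cc 1 = [] := PySem.List.pyRange_one_eq_nil hneg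
      simp [create_fallback_mapping_py, create_fallback_mapping_py_alt, h0, he]
    · have hpos : 0 < cc := by omega
      obtain ⟨n, hn⟩ : ∃ n : Nat, cc = (n : Int) := ⟨cc.toNat, by omega⟩
      subst hn
      simp only [create_fallback_mapping_py, create_fallback_mapping_py_alt,
        beq_iff_eq, h0, if_false]
      rw [cfm_fold_inv (PySem.Int.floordiv tc (n : Int)) (PySem.Int.mod tc (n : Int))
        (PySem.Int.mod_nonneg tc hpos) n]

-- ===== VERDICT (by name: the statement is the Claim_ definition above) =====
theorem create_fallback_mapping_py_spec : Claim_equal_create_fallback_mapping_py := by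
  intro cc tc _
  exact create_fallback_mapping_py_eq cc tc
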